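-- pv_equiv track=rewrite | github.com/IES-Rafael-Alberti/dam1-2425-ejercicios-u2-gromber05 | src/piramide.py | piramide
-- ===== SOURCE A (Python) =====
-- def piramide(num: int):
--     serie = ''
--     total = 0
--     for i in range(num + 1):
--         total += i
--     for i in reversed(range(num + 1)):
--
--         if i == 0:
--             i = str(i)
--             serie += i + ' = '
--         else:
--             i = str(i)
--             serie += i + ' + '
--     return serie, str(total)
-- ===== SOURCE B (Python) =====
-- def piramide(num: int):
--     if num < 0:
--         return '', '0'
--     serie = ' + '.join(str(i) for i in reversed(range(num + 1))) + ' = '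
--     return serie, str(num * (num + 1) // 2)
-- ===== Notes on version B (the rewrite author's own statement) =====
-- stated objective: simpler
-- what changed: Replaces the summation loop by the Gauss closed-form product-halving formula and the character-by-character accumulation loop by a single ' + '.join over the reversed range plus an ' = ' suffix.
import Mathlib
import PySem

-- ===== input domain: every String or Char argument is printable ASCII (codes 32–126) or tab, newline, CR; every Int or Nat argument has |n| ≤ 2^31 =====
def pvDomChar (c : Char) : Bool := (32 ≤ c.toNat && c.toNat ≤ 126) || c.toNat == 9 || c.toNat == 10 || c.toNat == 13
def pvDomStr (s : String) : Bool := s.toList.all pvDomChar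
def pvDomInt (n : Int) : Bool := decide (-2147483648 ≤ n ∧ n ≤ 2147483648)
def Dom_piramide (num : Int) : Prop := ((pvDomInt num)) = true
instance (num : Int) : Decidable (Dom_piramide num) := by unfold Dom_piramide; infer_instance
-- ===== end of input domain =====

-- B replaces A's two loops by the Gauss closed form for the total and a single join for the series (objective: simpler).

-- ===== PORT A =====
def piramide (num : Int) : String × String :=
  let total : Int := (PySem.List.pyRange 0 (num + 1) 1).foldl (fun t i => t + i) 0
  let serie : String := ((PySem.List.pyRange 0 (num + 1) 1).reverse).foldl
    (fun s i => if i == 0 then s ++ PySem.Int.toStr i ++ " = "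
                else s ++ PySem.Int.toStr i ++ " + ") ""
  (serie, PySem.Int.toStr total)

-- ===== PORT B =====
def piramide_alt (num : Int) : String × String :=
  if num < 0 then ("", "0")
  else
    let serie : String :=
      PySem.Str.join " + " (((PySem.List.pyRange 0 (num + 1) 1).reverse).map PySem.Int.toStr) ++ " = "
    (serie, PySem.Int.toStr (PySem.Int.floordiv (num * (num + 1)) 2))

-- ===== PRECONDITION & SPEC =====
def Spec_piramide (num : Int) (out : String × String) : Prop := out = piramide_alt num
instance (num : Int) (out : String × String) : Decidable (Spec_piramide num out) := by unfold Spec_piramide; infer_instance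

-- ===== CLAIM (what is proved, stated in full; the proofs are below) =====
def Claim_equal_piramide : Prop := ∀ (num : Int), Dom_piramide num → Spec_piramide num (piramide num)

-- ===== LEMMAS AND PROOFS =====

-- reversed(range(n+2)) starts with n+1
lemma rev_range_cons (n : Nat) :
    (PySem.List.pyRange 0 ((n : Int) + 1 + 1) 1).reverse
      = ((n : Int) + 1) :: (PySem.List.pyRange 0 ((n : Int) + 1) 1).reverse := by
  rw [PySem.List.pyRange_one_succ_right (by omega)]
  simp

-- A's summation loop equals the Gauss closed form
lemma total_double (n : Nat) :
    2 * (PySem.List.pyRange 0 ((n : Int) + 1) 1).foldl (fun t i => t + i) 0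
      = (n : Int) * ((n : Int) + 1) := by
  induction n with
  | zero => decide
  | succ m ih =>
    push_cast
    rw [PySem.List.pyRange_one_succ_right (by omega), List.foldl_append]
    simp only [List.foldl]
    push_cast at ih
    linear_combination ih

lemma total_eq (n : Nat) :
    (PySem.List.pyRange 0 ((n : Int) + 1) 1).foldl (fun t i => t + i) 0
      = PySem.Int.floordiv ((n : Int) * ((n : Int) + 1)) 2 := by
  rw [PySem.Int.floordiv_eq_ediv_of_pos (by omega), ← total_double n,
    Int.mul_ediv_cancel_left _ (by omega)]

-- A's string loop equals B's join plus suffix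
lemma serie_eq (n : Nat) (s : String) :
    ((PySem.List.pyRange 0 ((n : Int) + 1) 1).reverse).foldl
      (fun s i => if i == 0 then s ++ PySem.Int.toStr i ++ " = "
                  else s ++ PySem.Int.toStr i ++ " + ") s
      = s ++ PySem.Str.join " + " (((PySem.List.pyRange 0 ((n : Int) + 1) 1).reverse).map PySem.Int.toStr) ++ " = " := by
  induction n generalizing s with
  | zero =>
    have h01 : PySem.List.pyRange 0 1 1 = [0] := by decide
    simp only [Nat.cast_zero, zero_add]
    rw [h01]
    simp only [List.reverse_singleton, List.foldl_cons, List.foldl_nil, List.map_cons, List.map_nil]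
    rw [if_pos (by decide : ((0:Int) == 0) = true)]
    apply String.toList_inj.mp
    simp [String.toList_append, PySem.Str.toList_join, PySem.Chars.join_singleton]
  | succ m ih =>
    push_cast
    rw [rev_range_cons]
    simp only [List.foldl_cons, List.map_cons]
    rw [if_neg (by simp only [beq_iff_eq]; omega), ih]
    have hne : (PySem.List.pyRange 0 ((m : Int) + 1) 1).reverse ≠ [] := by
      simp [← List.length_pos_iff, PySem.List.length_pyRange_one]
    obtain ⟨a, l, hl⟩ := List.exists_cons_of_ne_nil hne
    apply String.toList_inj.mp
    simp only [hl, List.map_cons]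
    simp [String.toList_append, PySem.Str.toList_join, PySem.Chars.join_cons_cons]

-- ===== VERDICT (by name: the statement is the Claim_ definition above) =====
theorem piramide_spec : Claim_equal_piramide := by
  intro num _
  unfold Spec_piramide piramide piramide_alt
  by_cases h : num < 0
  · have hnil : PySem.List.pyRange 0 (num + 1) 1 = [] :=
      PySem.List.pyRange_one_eq_nil (by omega)
    simp [h, hnil]
    decide
  · obtain ⟨n, rfl⟩ := Int.eq_ofNat_of_zero_le (by omega : (0:Int) ≤ num)
    simp only [if_neg h]
    rw [total_eq n, serie_eq n ""]
    simp
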